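-- pv_equiv track=rewrite | github.com/Woseseltops/fowlt | confusibletrainer/confusible_trainer.py | add_three_words_right
-- ===== SOURCE A (Python) =====
-- def clean(string):
--     while '  ' in string:
--         string = string.replace('  ',' ');
--
--     if string[-1] == ' ':
--         string = string[:-1];
--
--     string = string.replace('{','[').replace('}',']');
--
--     return string.replace('\n','');
--
-- def add_three_words_right(lines,nl):
--     wordpointer = 0;
--     linepointer = 1;
--     next_line = [];
--
--     while len(next_line) < 3:
--
--         words_to_investigate = clean(lines[nl + linepointer]).split(' ');
--
--         if len(words_to_investigate) == wordpointer:
--             linepointer+= 1;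
--             words_to_investigate = clean(lines[nl + linepointer]).split(' ');
--             wordpointer = 0;
--
--         next_line.append(words_to_investigate[wordpointer]);
--         wordpointer += 1;
--
--     return next_line;
-- ===== SOURCE B (Python) =====
-- def clean(string):
--     while '  ' in string:
--         string = string.replace('  ',' ');
--
--     if string[-1] == ' ':
--         string = string[:-1];
--
--     string = string.replace('{','[').replace('}',']');
--
--     return string.replace('\n','');
--
-- def add_three_words_right(lines, nl):
--     result = []
--     linepointer = 1
--     while True:
--         for word in clean(lines[nl + linepointer]).split(' '):
--             result.append(word)
--             if len(result) == 3:
--                 return result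
--         linepointer += 1
-- ===== Notes on version B (the rewrite author's own statement) =====
-- stated objective: simpler
-- what changed: A's single flat while-loop with word/line pointer arithmetic (re-cleaning and re-splitting the current line every iteration and a special advance-and-reset branch) is replaced by a plain nested traversal: an outer loop over successive lines and an inner for-loop over that line's words, returning as soon as three words are collected.
import Mathlib
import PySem

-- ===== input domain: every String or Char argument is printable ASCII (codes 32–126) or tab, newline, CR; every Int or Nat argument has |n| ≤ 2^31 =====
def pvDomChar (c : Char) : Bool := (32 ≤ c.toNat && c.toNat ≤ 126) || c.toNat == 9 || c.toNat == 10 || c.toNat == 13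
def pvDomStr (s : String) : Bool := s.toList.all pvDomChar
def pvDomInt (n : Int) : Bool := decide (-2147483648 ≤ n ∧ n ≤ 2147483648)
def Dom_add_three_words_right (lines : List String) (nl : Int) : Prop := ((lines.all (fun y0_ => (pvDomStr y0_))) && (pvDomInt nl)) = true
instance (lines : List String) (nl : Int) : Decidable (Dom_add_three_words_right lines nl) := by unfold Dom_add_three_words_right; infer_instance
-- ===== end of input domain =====

-- B replaces A's word/line pointer arithmetic with a nested line-then-word traversal (same
-- flatten order, same stop-at-three behaviour); objective: simpler decomposition, not faster.

-- ===== PORT A =====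
-- shared helper `clean` (textually identical in both Pythons): the `while '  ' in s` loop runs on
-- fuel = len(s), which suffices since each replace of '  ' by ' ' strictly shrinks the string;
-- cleanPort returns none exactly where Python's clean raises IndexError (s[-1] of the empty string).
def cleanLoop : Nat → String → String
  | 0, s => s
  | f + 1, s =>
      if PySem.Str.isIn "  " s then cleanLoop f (PySem.Str.replace s "  " " ") else s

def cleanPort (s : String) : Option String :=
  let s1 := cleanLoop (PySem.Str.len s).toNat s
  match PySem.Str.pyGet? s1 (-1) with
  | none => none
  | some c =>
    let s2 := if c = ' ' then PySem.Str.slice s1 none (some (-1)) else s1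
    let s3 := PySem.Str.replace (PySem.Str.replace s2 "{" "[") "}" "]"
    some (PySem.Str.replace s3 "\n" "")

-- `.split(' ')`: the separator is the literal ' ' ≠ '', so PySem.Str.split? is always `some`
def splitW (c : String) : List String := (PySem.Str.split? c " ").getD []

-- A's `while len(next_line) < 3` appends exactly one word per iteration, so fuel 3 is exact;
-- a `none` from pyGet?/cleanPort is Python's IndexError (excluded by Pre_), we return acc there.
def goA (lines : List String) (nl : Int) : Nat → Nat → Int → List String → List String
  | 0, _, _, acc => acc
  | f + 1, wp, lp, acc =>
    if acc.length < 3 then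
      match PySem.List.pyGet? lines (nl + lp) with
      | none => acc
      | some l =>
        match cleanPort l with
        | none => acc
        | some c =>
          let words := splitW c
          if words.length = wp then
            match PySem.List.pyGet? lines (nl + (lp + 1)) with
            | none => acc
            | some l2 =>
              match cleanPort l2 with
              | none => acc
              | some c2 =>
                let words2 := splitW c2
                match PySem.List.pyGet? words2 ((0 : Nat) : Int) with
                | none => acc
                | some w => goA lines nl f 1 (lp + 1) (acc ++ [w])
          else
            match PySem.List.pyGet? words ((wp : Nat) : Int) with
            | none => acc
            | some w => goA lines nl f (wp + 1) lp (acc ++ [w])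
    else acc

def add_three_words_right (lines : List String) (nl : Int) : List String :=
  goA lines nl 3 0 1 []

-- ===== PORT B =====
-- inner `for word in words` loop: append each word, signal once three are collected
def innerB : List String → List String → List String × Bool
  | [], acc => (acc, false)
  | w :: ws, acc =>
      let acc' := acc ++ [w]
      if acc'.length = 3 then (acc', true) else innerB ws acc'

-- outer `while True` over successive lines; each line contributes at least one word, so
-- fuel 3 is exact wherever Python B returns; `none` = Python's IndexError (outside Pre_).
def goB (lines : List String) (nl : Int) : Nat → Int → List String → List String
  | 0, _, acc => acc
  | f + 1, lp, acc =>
    match PySem.List.pyGet? lines (nl + lp) with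
    | none => acc
    | some l =>
      match cleanPort l with
      | none => acc
      | some c =>
        match innerB (splitW c) acc with
        | (acc', true) => acc'
        | (acc', false) => goB lines nl f (lp + 1) acc'

def add_three_words_right_alt (lines : List String) (nl : Int) : List String :=
  goB lines nl 3 1 []

-- ===== PRECONDITION & SPEC =====
-- the cleaned-and-split word list of line j, none where Python's indexing/clean raises
def lineWords (lines : List String) (j : Int) : Option (List String) :=
  (PySem.List.pyGet? lines j).bind (fun s => (cleanPort s).map splitW)

def lwc (lines : List String) (j : Int) : Nat :=
  ((lineWords lines j).map List.length).getD 0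

-- Pre_ excludes exactly the inputs where Python A raises (IndexError running past the end of
-- `lines`, or IndexError in `clean` on an empty line): the lines after nl must supply three
-- words before running out.  A line's word count is by definition the length of its cleaned
-- split, so Pre_ inspects at most the first three lines after nl through the same `clean`
-- helper; it does not simulate either function's traversal.
def Pre_add_three_words_right (lines : List String) (nl : Int) : Prop :=
  (lineWords lines (nl + 1)).isSome ∧
    (3 ≤ lwc lines (nl + 1) ∨
      ((lineWords lines (nl + 2)).isSome ∧
        (3 ≤ lwc lines (nl + 1) + lwc lines (nl + 2) ∨ (lineWords lines (nl + 3)).isSome)))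
instance (lines : List String) (nl : Int) : Decidable (Pre_add_three_words_right lines nl) := by
  unfold Pre_add_three_words_right; infer_instance

def pvWitness_add_three_words_right : List String × Int := (["x", "a b c"], 0)

def Spec_add_three_words_right (lines : List String) (nl : Int) (out : List String) : Prop := out = add_three_words_right_alt lines nl
instance (lines : List String) (nl : Int) (out : List String) : Decidable (Spec_add_three_words_right lines nl out) := by unfold Spec_add_three_words_right; infer_instance

-- ===== CLAIM (what is proved, stated in full; the proofs are below) =====
def Claim_equal_add_three_words_right : Prop := ∀ (lines : List String) (nl : Int), Dom_add_three_words_right lines nl → Pre_add_three_words_right lines nl → Spec_add_three_words_right lines nl (add_three_words_right lines nl)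

-- ===== LEMMAS AND PROOFS =====

lemma go_ne_nil (sep : List Char) : ∀ (fuel : Nat) (l cur : List Char) (acc : List (List Char)),
    PySem.Chars.splitOn.go sep fuel l cur acc ≠ [] := by
  intro fuel
  induction fuel with
  | zero => intro l cur acc; simp [PySem.Chars.splitOn.go]
  | succ f ih =>
    intro l cur acc
    cases l with
    | nil => simp [PySem.Chars.splitOn.go]
    | cons c rest =>
      simp only [PySem.Chars.splitOn.go]
      split
      · exact ih _ _ _
      · exact ih _ _ _

lemma splitW_ne_nil (c : String) : splitW c ≠ [] := by
  simp only [splitW, PySem.Str.split?, PySem.Chars.split?, PySem.Chars.splitOn]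
  simp
  exact go_ne_nil _ _ _ _ _

lemma lineWords_some (lines : List String) (j : Int) (w : List String)
    (h : lineWords lines j = some w) :
    ∃ s c, PySem.List.pyGet? lines j = some s ∧ cleanPort s = some c ∧ splitW c = w := by
  unfold lineWords at h
  rw [Option.bind_eq_some_iff] at h
  obtain ⟨s, hg, h⟩ := h
  rw [Option.map_eq_some_iff] at h
  obtain ⟨c, hc, rfl⟩ := h
  exact ⟨s, c, hg, hc, rfl⟩

lemma key (lines : List String) (nl : Int)
    (hPre : Pre_add_three_words_right lines nl) :
    add_three_words_right lines nl = add_three_words_right_alt lines nl := by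
  obtain ⟨h0s, hrest⟩ := hPre
  rw [Option.isSome_iff_exists] at h0s
  obtain ⟨w0, hlw0⟩ := h0s
  obtain ⟨s0, c0, hg0, hc0, hsp0⟩ := lineWords_some _ _ _ hlw0
  have hn0 : lwc lines (nl + 1) = w0.length := by simp [lwc, hlw0]
  rw [hn0] at hrest
  have hw0ne : w0 ≠ [] := hsp0 ▸ splitW_ne_nil c0
  by_cases h3 : 3 ≤ w0.length
  · -- first line already has three words
    rcases w0 with _ | ⟨a, _ | ⟨b, _ | ⟨c, r⟩⟩⟩
    · simp at h3
    · simp at h3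
    · simp at h3
    · simp [PySem.List.pyGet?_of_nonneg, add_three_words_right, add_three_words_right_alt,
        goA, goB, innerB, hg0, hc0, hsp0]
  · -- need the second line
    obtain ⟨h1s, hrest2⟩ := hrest.resolve_left h3
    rw [Option.isSome_iff_exists] at h1s
    obtain ⟨w1, hlw1⟩ := h1s
    obtain ⟨s1, c1, hg1, hc1, hsp1⟩ := lineWords_some _ _ _ hlw1
    have hn1 : lwc lines (nl + 2) = w1.length := by simp [lwc, hlw1]
    rw [hn1] at hrest2
    have hw1ne : w1 ≠ [] := hsp1 ▸ splitW_ne_nil c1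
    rcases w0 with _ | ⟨a, _ | ⟨b, _ | ⟨c, r⟩⟩⟩
    · exact absurd rfl hw0ne
    · -- one word on the first line
      rcases w1 with _ | ⟨d, _ | ⟨e, r1⟩⟩
      · exact absurd rfl hw1ne
      · -- both lines have one word, third from the third line
        have h2s : (lineWords lines (nl + 3)).isSome := by
          rcases hrest2 with h | h
          · simp at h
          · exact h
        rw [Option.isSome_iff_exists] at h2s
        obtain ⟨w2, hlw2⟩ := h2s
        obtain ⟨s2, c2, hg2, hc2, hsp2⟩ := lineWords_some _ _ _ hlw2
        have hw2ne : w2 ≠ [] := hsp2 ▸ splitW_ne_nil c2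
        rcases w2 with _ | ⟨f, r2⟩
        · exact absurd rfl hw2ne
        · simp [add_three_words_right, add_three_words_right_alt, goA,
            goB, innerB, hg0, hc0, hsp0, hg1, hc1, hsp1, hg2, hc2, hsp2]
      · -- one word on the first line, two from the second
        simp [PySem.List.pyGet?_of_nonneg, add_three_words_right, add_three_words_right_alt,
          goA, goB, innerB, hg0, hc0, hsp0, hg1, hc1, hsp1]
    · -- two words on the first line, third from the second line
      rcases w1 with _ | ⟨d, r1⟩
      · exact absurd rfl hw1ne
      · simp [add_three_words_right, add_three_words_right_alt, goA, goB, innerB,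
          hg0, hc0, hsp0, hg1, hc1, hsp1]
    · simp at h3

-- ===== VERDICT (by name: the statement is the Claim_ definition above) =====
theorem add_three_words_right_spec : Claim_equal_add_three_words_right := by
  intro lines nl _ hPre
  unfold Spec_add_three_words_right
  exact key lines nl hPre
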